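-- pv_equiv track=rewrite | github.com/manastokale/CreditRiskManagement | src/preprocessing.py | parse_payment_history
-- ===== SOURCE A (Python) =====
-- from typing import Tuple, List, Optional
--
-- DELINQUENCY_MAP = {
--     # ── No delinquency ──
--     'A': 0, 'I': 0, 'Q': 0, 'Z': 0,
--     '0': 0,
--     '#': 0, '%': 0, '+': 0, '-': 0,  # credit balance variants
--     # ── Delinquency levels ──
--     'B': 1, 'J': 1, '1': 1,
--     'C': 2, 'K': 2, '2': 2,
--     'D': 3, 'L': 3, '3': 3,
--     'E': 4, 'M': 4, 'U': 4, '4': 4,  # U=Stolen → treat as severe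
--     'F': 5, 'N': 5, '5': 5,
--     'G': 6, 'O': 6, '6': 6,
--     'H': 7, 'P': 7, '7': 7,
-- }
--
-- RISK_STATUS_FLAGS = {'B', 'C', 'E', 'F', 'L', 'U'}
--
-- def parse_payment_history(hist_str: str) -> Tuple[int, int, int]:
--     """
--     Parse a 12-character payment history string into numeric features.
--
--     Returns:
--         (delinquent_cycle_count, max_delinquency_level, risk_flag_count)
--     """
--     if not isinstance(hist_str, str) or len(hist_str) == 0:
--         return (0, 0, 0)
--
--     delinquent_count = 0
--     max_delinquency = 0
--     risk_flags = 0
--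
--     for ch in hist_str.upper():
--         dlq = DELINQUENCY_MAP.get(ch, 0)
--         if dlq > 0:
--             delinquent_count += 1
--             max_delinquency = max(max_delinquency, dlq)
--         if ch in RISK_STATUS_FLAGS:
--             risk_flags += 1
--
--     return (delinquent_count, max_delinquency, risk_flags)
-- ===== SOURCE B (Python) =====
-- from typing import Tuple
--
-- LEVEL_CHARS = [
--     (1, 'BJ1'),
--     (2, 'CK2'),
--     (3, 'DL3'),
--     (4, 'EMU4'),
--     (5, 'FN5'),
--     (6, 'GO6'),
--     (7, 'HP7'),
-- ]
--
-- RISK_CHARS = 'BCEFLU'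
--
-- def parse_payment_history(hist_str):
--     if not isinstance(hist_str, str) or len(hist_str) == 0:
--         return (0, 0, 0)
--     s = hist_str.upper()
--     delinquent_count = 0
--     max_delinquency = 0
--     for level, chars in LEVEL_CHARS:
--         level_count = 0
--         for ch in chars:
--             level_count += s.count(ch)
--         delinquent_count += level_count
--         if level_count > 0:
--             max_delinquency = level
--     risk_flags = 0
--     for ch in RISK_CHARS:
--         risk_flags += s.count(ch)
--     return (delinquent_count, max_delinquency, risk_flags)
-- ===== Notes on version B (the rewrite author's own statement) =====
-- stated objective: faster
-- what changed: B inverts the traversal: instead of scanning the string once in Python with a triple accumulator and a DELINQUENCY_MAP lookup per character, it iterates over the fixed alphabet (seven per-level character classes plus the risk characters) and uses s.count(ch) per class character, taking max_delinquency as the highest level whose class count is positive.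
import Mathlib
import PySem

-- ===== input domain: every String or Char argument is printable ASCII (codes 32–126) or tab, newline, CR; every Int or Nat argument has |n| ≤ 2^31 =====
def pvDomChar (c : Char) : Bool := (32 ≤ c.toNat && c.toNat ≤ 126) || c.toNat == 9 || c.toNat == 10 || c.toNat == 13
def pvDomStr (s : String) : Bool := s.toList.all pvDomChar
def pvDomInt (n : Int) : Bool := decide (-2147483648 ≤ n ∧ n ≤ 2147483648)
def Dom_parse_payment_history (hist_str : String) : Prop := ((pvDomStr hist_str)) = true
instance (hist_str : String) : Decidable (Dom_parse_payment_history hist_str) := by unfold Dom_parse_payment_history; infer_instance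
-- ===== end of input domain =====

-- B inverts the traversal: it iterates the fixed alphabet (per-level character classes and the risk
-- characters) counting occurrences of each class character in the string, instead of A's single scan
-- with a per-character triple accumulator and dict lookup (constant-factor speedup measured).

-- module-level constant shared by both Pythons
def pphDM : PySem.Dict Char Int := PySem.Dict.ofList
  [('A',0),('I',0),('Q',0),('Z',0),('0',0),('#',0),('%',0),('+',0),('-',0),
   ('B',1),('J',1),('1',1),('C',2),('K',2),('2',2),('D',3),('L',3),('3',3),
   ('E',4),('M',4),('U',4),('4',4),('F',5),('N',5),('5',5),('G',6),('O',6),('6',6),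
   ('H',7),('P',7),('7',7)]

def pphRisk : PySem.Set Char := PySem.Set.ofList ['B','C','E','F','L','U']

-- ===== PORT A =====
def parse_payment_history (hist_str : String) : Int × Int × Int :=
  if PySem.Str.len hist_str == 0 then (0, 0, 0)
  else
    (PySem.Str.upper hist_str).toList.foldl
      (fun (s : Int × Int × Int) ch =>
        let dlq := pphDM.getD ch 0
        let s1 := if dlq > 0 then (s.1 + 1, max s.2.1 dlq, s.2.2) else s
        if PySem.Set.contains pphRisk ch then (s1.1, s1.2.1, s1.2.2 + 1) else s1)
      (0, 0, 0)

-- ===== PORT B =====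
-- B's module constant LEVEL_CHARS (a list of (level, chars) pairs)
def pphLevelChars : List (Int × List Char) :=
  [(1, ['B','J','1']),
   (2, ['C','K','2']),
   (3, ['D','L','3']),
   (4, ['E','M','U','4']),
   (5, ['F','N','5']),
   (6, ['G','O','6']),
   (7, ['H','P','7'])]

def pphRiskChars : List Char := ['B','C','E','F','L','U']

-- the inner 'for ch in chars: level_count += s.count(ch)' loop; Python's str.count with a
-- single-character needle is exactly List.count on the code points (overlap cannot occur)
def pphClassCount (s : List Char) (chars : List Char) : Int :=
  chars.foldl (fun a ch => a + (s.count ch : Int)) 0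

def parse_payment_history_alt (hist_str : String) : Int × Int × Int :=
  if PySem.Str.len hist_str == 0 then (0, 0, 0)
  else
    let s := (PySem.Str.upper hist_str).toList
    let dm := pphLevelChars.foldl
      (fun (p : Int × Int) lc =>
        let level_count := pphClassCount s lc.2
        (p.1 + level_count, if level_count > 0 then lc.1 else p.2))
      (0, 0)
    let risk_flags := pphRiskChars.foldl (fun a ch => a + (s.count ch : Int)) 0
    (dm.1, dm.2, risk_flags)

-- ===== PRECONDITION & SPEC =====
def Spec_parse_payment_history (hist_str : String) (out : Int × Int × Int) : Prop := out = parse_payment_history_alt hist_str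
instance (hist_str : String) (out : Int × Int × Int) : Decidable (Spec_parse_payment_history hist_str out) := by unfold Spec_parse_payment_history; infer_instance

-- ===== CLAIM (what is proved, stated in full; the proofs are below) =====
def Claim_equal_parse_payment_history : Prop := ∀ (hist_str : String), Dom_parse_payment_history hist_str → Spec_parse_payment_history hist_str (parse_payment_history hist_str)

-- ===== LEMMAS AND PROOFS =====

def pphDlq (c : Char) : Int := pphDM.getD c 0
def pphP (c : Char) : Bool := decide (0 < pphDlq c)
def pphQ (c : Char) : Bool := PySem.Set.contains pphRisk c
def pphG (m : Int) (c : Char) : Int := if pphDlq c > 0 then max m (pphDlq c) else m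
def pphGM (m : Int) (c : Char) : Int := max m (pphDlq c)


def pphPairs : List (Char × Int) :=
  [('A',0),('I',0),('Q',0),('Z',0),('0',0),('#',0),('%',0),('+',0),('-',0),
   ('B',1),('J',1),('1',1),('C',2),('K',2),('2',2),('D',3),('L',3),('3',3),
   ('E',4),('M',4),('U',4),('4',4),('F',5),('N',5),('5',5),('G',6),('O',6),('6',6),
   ('H',7),('P',7),('7',7)]

def pphAllDel : List Char :=
  ['B','J','1','C','K','2','D','L','3','E','M','U','4','F','N','5','G','O','6','H','P','7']

lemma pphDM_mk : pphDM = PySem.Dict.mk pphPairs := by decide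

lemma getD_nonneg_aux (c : Char) : ∀ (ps : List (Char × Int)), (∀ p ∈ ps, 0 ≤ p.2) →
    0 ≤ ((PySem.Dict.mk ps).get? c).getD 0 := by
  intro ps
  induction ps with
  | nil => intro _; simp [PySem.Dict.get?]
  | cons kv t ih =>
      intro h
      rw [show PySem.Dict.mk (kv :: t) = PySem.Dict.mk ((kv.1, kv.2) :: t) by rfl,
        PySem.Dict.get?_mk_cons]
      by_cases hk : (kv.1 == c) = true
      · simp only [hk, if_true, Option.getD_some]
        exact h kv (by simp)
      · simp only [hk]
        exact ih (fun p hp => h p (by simp [hp]))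

lemma pphDlq_nonneg (c : Char) : 0 ≤ pphDlq c := by
  rw [pphDlq, pphDM_mk, PySem.Dict.getD_eq_get?_getD]
  exact getD_nonneg_aux c _ (by decide)

lemma dlq_pos_mem_pairs (c : Char) (h : 0 < pphDlq c) : (c, pphDlq c) ∈ pphPairs := by
  rw [pphDlq, pphDM_mk, PySem.Dict.getD_eq_get?_getD] at h ⊢
  cases hg : (PySem.Dict.mk pphPairs).get? c with
  | none => rw [hg] at h; simp at h
  | some v =>
      simp only [Option.getD_some]
      exact PySem.Dict.mem_items_of_get?_eq_some _ hg

-- ===== A-side characterisation =====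
lemma stepA_eval (s : Int × Int × Int) (c : Char) :
    (fun (s : Int × Int × Int) ch =>
        let dlq := pphDM.getD ch 0
        let s1 := if dlq > 0 then (s.1 + 1, max s.2.1 dlq, s.2.2) else s
        if PySem.Set.contains pphRisk ch then (s1.1, s1.2.1, s1.2.2 + 1) else s1) s c
    = (s.1 + (if pphP c then 1 else 0), pphG s.2.1 c, s.2.2 + (if pphQ c then 1 else 0)) := by
  by_cases h1 : (0:Int) < pphDM.getD c 0 <;> by_cases h2 : PySem.Set.contains pphRisk c = true <;>
    simp_all [pphP, pphQ, pphG, pphDlq] <;> split_ifs <;> simp_all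

lemma foldA (l : List Char) : ∀ (d m r : Int),
    l.foldl (fun (s : Int × Int × Int) ch =>
        let dlq := pphDM.getD ch 0
        let s1 := if dlq > 0 then (s.1 + 1, max s.2.1 dlq, s.2.2) else s
        if PySem.Set.contains pphRisk ch then (s1.1, s1.2.1, s1.2.2 + 1) else s1) (d, m, r)
    = (d + (l.countP pphP : Int), l.foldl pphG m, r + (l.countP pphQ : Int)) := by
  induction l with
  | nil => intro d m r; simp
  | cons c t ih =>
      intro d m r
      simp only [List.foldl_cons, stepA_eval] at ih ⊢
      rw [ih]
      simp only [Prod.mk.injEq]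
      refine ⟨?_, ?_, ?_⟩
      · rw [List.countP_cons]; by_cases hp : pphP c <;> simp [hp] <;> omega
      · trivial
      · rw [List.countP_cons]; by_cases hq : pphQ c <;> simp [hq] <;> omega

-- ===== counting: sum of per-character counts = countP of membership =====
lemma foldl_add_init (v : List Char) (f : Char → Int) (c : Int) : ∀ s : Int,
    v.foldl (fun a k => a + f k) (c + s) = c + v.foldl (fun a k => a + f k) s := by
  induction v with
  | nil => intro s; rfl
  | cons x t ih => intro s; simpa [add_assoc] using ih (s + f x)

lemma countP_or_disjoint (p q : Char → Bool) (l : List Char) (h : ∀ x, ¬(p x = true ∧ q x = true)) :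
    l.countP (fun x => p x || q x) = l.countP p + l.countP q := by
  induction l with
  | nil => rfl
  | cons x t ih =>
      have hx := h x
      by_cases hp : p x = true <;> by_cases hq : q x = true <;>
        simp_all <;> omega

lemma sum_counts (ks : List Char) (l : List Char) (hnd : ks.Nodup) :
    ks.foldl (fun a k => a + (l.count k : Int)) 0 = (l.countP (fun c => ks.contains c) : Int) := by
  induction ks with
  | nil => simp
  | cons k t ih =>
      have hk : k ∉ t := (List.nodup_cons.mp hnd).1
      have hnd' : t.Nodup := (List.nodup_cons.mp hnd).2
      rw [List.foldl_cons, show ((0:Int) + (l.count k : Int)) = ((l.count k : Int) + 0) by ring,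
        foldl_add_init, ih hnd']
      have hsplit : l.countP (fun c => (k :: t).contains c)
          = l.countP (fun c => c == k) + l.countP (fun c => t.contains c) := by
        have := countP_or_disjoint (fun c => c == k) (fun c => t.contains c) l
          (by
            intro x hx
            rcases hx with ⟨h1, h2⟩
            exact hk (by simpa using (beq_iff_eq.mp h1) ▸ (by simpa using h2)))
        rw [← this]
        congr 1
      rw [hsplit, List.count_eq_countP]
      push_cast
      ring

-- ===== class-count positivity =====
lemma classCount_eq_countP (l ks : List Char) (hnd : ks.Nodup) :
    pphClassCount l ks = (l.countP (fun c => ks.contains c) : Int) :=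
  sum_counts ks l hnd

lemma classCount_pos_iff (l ks : List Char) (hnd : ks.Nodup) :
    0 < pphClassCount l ks ↔ ∃ c ∈ l, c ∈ ks := by
  rw [classCount_eq_countP l ks hnd]
  rw [show ((0:Int) < (l.countP (fun c => ks.contains c) : Int)) ↔
      0 < l.countP (fun c => ks.contains c) by exact_mod_cast Iff.rfl]
  rw [List.countP_pos_iff]
  simp

-- ===== max characterisation (A side) =====
lemma fmax_init_le (l : List Char) : ∀ m : Int, m ≤ l.foldl pphGM m := by
  induction l with
  | nil => intro m; simp
  | cons c t ih => intro m; exact le_trans (le_max_left _ _) (ih (pphGM m c))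

lemma fmax_mem_le (l : List Char) : ∀ (m : Int) (x : Char), x ∈ l → pphDlq x ≤ l.foldl pphGM m := by
  induction l with
  | nil => intro _ _ h; simp at h
  | cons c t ih =>
      intro m x hx
      rcases List.mem_cons.mp hx with h | h
      · subst h; exact le_trans (le_max_right _ _) (fmax_init_le t _)
      · exact ih _ x h

lemma fmax_cases (l : List Char) : ∀ m : Int,
    l.foldl pphGM m = m ∨ ∃ x ∈ l, l.foldl pphGM m = pphDlq x := by
  induction l with
  | nil => intro m; left; rfl
  | cons c t ih =>
      intro m
      rcases ih (pphGM m c) with h | ⟨x, hx, h⟩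
      · rw [List.foldl_cons, h]
        simp only [pphGM]
        rcases max_cases m (pphDlq c) with ⟨h1, _⟩ | ⟨h1, _⟩
        · left; exact h1
        · right; exact ⟨c, by simp, h1⟩
      · rw [List.foldl_cons, h]
        right; exact ⟨x, by simp [hx], rfl⟩

lemma fold_g_eq_gm (l : List Char) : ∀ m : Int, 0 ≤ m → l.foldl pphG m = l.foldl pphGM m := by
  induction l with
  | nil => intro m _; rfl
  | cons c t ih =>
      intro m hm
      by_cases h : 0 < pphDlq c
      · simp only [List.foldl_cons, pphG, pphGM, if_pos h]
        exact ih _ (le_trans hm (le_max_left _ _))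
      · have h0 : pphDlq c = 0 := le_antisymm (not_lt.mp h) (pphDlq_nonneg c)
        simp only [List.foldl_cons, pphG, pphGM, h0, max_eq_left hm]
        simpa [h0] using ih _ hm

lemma class_le_M (l ks : List Char) (lvl : Int) (hnd : ks.Nodup)
    (hd : ∀ c ∈ ks, pphDlq c = lvl) (h : 0 < pphClassCount l ks) :
    lvl ≤ l.foldl pphGM 0 := by
  obtain ⟨c, hc, hck⟩ := (classCount_pos_iff l ks hnd).mp h
  rw [← hd c hck]
  exact fmax_mem_le l 0 c hc

-- ===== pointwise predicate identifications =====
lemma pphAllDelP : ∀ c ∈ pphAllDel, pphP c = true := by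
  intro c hc
  fin_cases hc <;>
    (simp [pphP, pphDlq, pphDM_mk, pphPairs, PySem.Dict.getD_eq_get?_getD, PySem.Dict.get?_mk_cons])

lemma pphP_eq (c : Char) : pphP c = pphAllDel.contains c := by
  by_cases h : c ∈ pphAllDel
  · have h1 : pphP c = true := pphAllDelP c h
    simp [h1, h]
  · have h0 : pphP c = false := by
      by_contra hc
      have hp : 0 < pphDlq c := by
        have : pphP c = true := by simpa using hc
        simpa [pphP] using this
      have hm := dlq_pos_mem_pairs c hp
      have hall : ∀ p ∈ pphPairs, 0 < p.2 → p.1 ∈ pphAllDel := by decide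
      exact h (hall _ hm hp)
    simp [h0, h]

lemma pphQ_eq (c : Char) : pphQ c = pphRiskChars.contains c := by
  have hr : pphRisk = pphRiskChars := by decide
  rw [pphQ, hr, PySem.Set.contains_eq_listContains]

-- splitting countP over a disjoint union of character classes
lemma countP_contains_append (l as bs : List Char) (h : ∀ x ∈ as, x ∉ bs) :
    l.countP (fun c => (as ++ bs).contains c)
      = l.countP (fun c => as.contains c) + l.countP (fun c => bs.contains c) := by
  rw [← countP_or_disjoint (fun c => as.contains c) (fun c => bs.contains c) l
    (by intro x hx; rcases hx with ⟨h1, h2⟩; exact h x (by simpa using h1) (by simpa using h2))]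
  congr 1
  funext c
  simp

lemma pphND1 : (['B','J','1'] : List Char).Nodup := by decide
lemma pphND2 : (['C','K','2'] : List Char).Nodup := by decide
lemma pphND3 : (['D','L','3'] : List Char).Nodup := by decide
lemma pphND4 : (['E','M','U','4'] : List Char).Nodup := by decide
lemma pphND5 : (['F','N','5'] : List Char).Nodup := by decide
lemma pphND6 : (['G','O','6'] : List Char).Nodup := by decide
lemma pphND7 : (['H','P','7'] : List Char).Nodup := by decide
lemma pphDlqAll1 : ∀ c ∈ (['B','J','1'] : List Char), pphDlq c = 1 := by
  intro c hc
  fin_cases hc <;>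
    (rw [pphDlq, pphDM_mk, PySem.Dict.getD_eq_get?_getD, pphPairs]; simp [PySem.Dict.get?_mk_cons])
lemma pphDlqAll2 : ∀ c ∈ (['C','K','2'] : List Char), pphDlq c = 2 := by
  intro c hc
  fin_cases hc <;>
    (rw [pphDlq, pphDM_mk, PySem.Dict.getD_eq_get?_getD, pphPairs]; simp [PySem.Dict.get?_mk_cons])
lemma pphDlqAll3 : ∀ c ∈ (['D','L','3'] : List Char), pphDlq c = 3 := by
  intro c hc
  fin_cases hc <;>
    (rw [pphDlq, pphDM_mk, PySem.Dict.getD_eq_get?_getD, pphPairs]; simp [PySem.Dict.get?_mk_cons])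
lemma pphDlqAll4 : ∀ c ∈ (['E','M','U','4'] : List Char), pphDlq c = 4 := by
  intro c hc
  fin_cases hc <;>
    (rw [pphDlq, pphDM_mk, PySem.Dict.getD_eq_get?_getD, pphPairs]; simp [PySem.Dict.get?_mk_cons])
lemma pphDlqAll5 : ∀ c ∈ (['F','N','5'] : List Char), pphDlq c = 5 := by
  intro c hc
  fin_cases hc <;>
    (rw [pphDlq, pphDM_mk, PySem.Dict.getD_eq_get?_getD, pphPairs]; simp [PySem.Dict.get?_mk_cons])
lemma pphDlqAll6 : ∀ c ∈ (['G','O','6'] : List Char), pphDlq c = 6 := by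
  intro c hc
  fin_cases hc <;>
    (rw [pphDlq, pphDM_mk, PySem.Dict.getD_eq_get?_getD, pphPairs]; simp [PySem.Dict.get?_mk_cons])
lemma pphDlqAll7 : ∀ c ∈ (['H','P','7'] : List Char), pphDlq c = 7 := by
  intro c hc
  fin_cases hc <;>
    (rw [pphDlq, pphDM_mk, PySem.Dict.getD_eq_get?_getD, pphPairs]; simp [PySem.Dict.get?_mk_cons])

lemma pphDisj1 : ∀ x ∈ (['B','J','1'] : List Char), x ∉ (['C','K','2','D','L','3','E','M','U','4','F','N','5','G','O','6','H','P','7'] : List Char) := by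
  intro x hx
  fin_cases hx <;> simp
lemma pphDisj2 : ∀ x ∈ (['C','K','2'] : List Char), x ∉ (['D','L','3','E','M','U','4','F','N','5','G','O','6','H','P','7'] : List Char) := by
  intro x hx
  fin_cases hx <;> simp
lemma pphDisj3 : ∀ x ∈ (['D','L','3'] : List Char), x ∉ (['E','M','U','4','F','N','5','G','O','6','H','P','7'] : List Char) := by
  intro x hx
  fin_cases hx <;> simp
lemma pphDisj4 : ∀ x ∈ (['E','M','U','4'] : List Char), x ∉ (['F','N','5','G','O','6','H','P','7'] : List Char) := by
  intro x hx
  fin_cases hx <;> simp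
lemma pphDisj5 : ∀ x ∈ (['F','N','5'] : List Char), x ∉ (['G','O','6','H','P','7'] : List Char) := by
  intro x hx
  fin_cases hx <;> simp
lemma pphDisj6 : ∀ x ∈ (['G','O','6'] : List Char), x ∉ (['H','P','7'] : List Char) := by
  intro x hx
  fin_cases hx <;> simp

-- ===== VERDICT (by name: the statement is the Claim_ definition above) =====
set_option maxHeartbeats 1000000 in
set_option maxRecDepth 10000 in
theorem parse_payment_history_spec : Claim_equal_parse_payment_history := by
  intro hist _
  unfold Spec_parse_payment_history parse_payment_history parse_payment_history_alt
  by_cases h0 : (PySem.Str.len hist == 0) = true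
  · rw [if_pos h0, if_pos h0]
  · rw [if_neg h0, if_neg h0]
    rw [foldA]
    set l := (PySem.Str.upper hist).toList with hl
    simp only [pphLevelChars, List.foldl_cons, List.foldl_nil, zero_add]
    simp only [Prod.mk.injEq]
    refine ⟨?_, ?_, ?_⟩
    · -- delinquent_count
      have e1 : pphClassCount l ['B','J','1'] = (l.countP (fun c => List.contains ['B','J','1'] c) : Int) := classCount_eq_countP l _ pphND1
      have e2 : pphClassCount l ['C','K','2'] = (l.countP (fun c => List.contains ['C','K','2'] c) : Int) := classCount_eq_countP l _ pphND2
      have e3 : pphClassCount l ['D','L','3'] = (l.countP (fun c => List.contains ['D','L','3'] c) : Int) := classCount_eq_countP l _ pphND3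
      have e4 : pphClassCount l ['E','M','U','4'] = (l.countP (fun c => List.contains ['E','M','U','4'] c) : Int) := classCount_eq_countP l _ pphND4
      have e5 : pphClassCount l ['F','N','5'] = (l.countP (fun c => List.contains ['F','N','5'] c) : Int) := classCount_eq_countP l _ pphND5
      have e6 : pphClassCount l ['G','O','6'] = (l.countP (fun c => List.contains ['G','O','6'] c) : Int) := classCount_eq_countP l _ pphND6
      have e7 : pphClassCount l ['H','P','7'] = (l.countP (fun c => List.contains ['H','P','7'] c) : Int) := classCount_eq_countP l _ pphND7
      have hA : l.countP pphP = l.countP (fun c => pphAllDel.contains c) :=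
        List.countP_congr (fun x _ => by rw [pphP_eq x])
      have hsum : l.countP (fun c => pphAllDel.contains c)
          = l.countP (fun c => List.contains ['B','J','1'] c)
            + (l.countP (fun c => List.contains ['C','K','2'] c)
            + (l.countP (fun c => List.contains ['D','L','3'] c)
            + (l.countP (fun c => List.contains ['E','M','U','4'] c)
            + (l.countP (fun c => List.contains ['F','N','5'] c)
            + (l.countP (fun c => List.contains ['G','O','6'] c)
            + l.countP (fun c => List.contains ['H','P','7'] c)))))) := by
        rw [show pphAllDel = ['B','J','1'] ++ ['C','K','2','D','L','3','E','M','U','4','F','N','5','G','O','6','H','P','7'] from rfl,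
          countP_contains_append l _ _ pphDisj1,
          show (['C','K','2','D','L','3','E','M','U','4','F','N','5','G','O','6','H','P','7'] : List Char) = ['C','K','2'] ++ ['D','L','3','E','M','U','4','F','N','5','G','O','6','H','P','7'] from rfl,
          countP_contains_append l _ _ pphDisj2,
          show (['D','L','3','E','M','U','4','F','N','5','G','O','6','H','P','7'] : List Char) = ['D','L','3'] ++ ['E','M','U','4','F','N','5','G','O','6','H','P','7'] from rfl,
          countP_contains_append l _ _ pphDisj3,
          show (['E','M','U','4','F','N','5','G','O','6','H','P','7'] : List Char) = ['E','M','U','4'] ++ ['F','N','5','G','O','6','H','P','7'] from rfl,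
          countP_contains_append l _ _ pphDisj4,
          show (['F','N','5','G','O','6','H','P','7'] : List Char) = ['F','N','5'] ++ ['G','O','6','H','P','7'] from rfl,
          countP_contains_append l _ _ pphDisj5,
          show (['G','O','6','H','P','7'] : List Char) = ['G','O','6'] ++ ['H','P','7'] from rfl,
          countP_contains_append l _ _ pphDisj6]
      rw [e1, e2, e3, e4, e5, e6, e7, hA]
      push_cast [hsum]
      ring
    · -- max_delinquency
      rw [fold_g_eq_gm l 0 le_rfl]
      refine le_antisymm ?_ ?_
      · rcases fmax_cases l 0 with h | ⟨x, hx, h⟩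
        · rw [h]; split_ifs <;> norm_num
        · rw [h]
          by_cases hp : 0 < pphDlq x
          · have hmem := dlq_pos_mem_pairs x hp
            have hall : ∀ p ∈ pphPairs, p.2 = 0 ∨ (p.2 = 1 ∧ p.1 ∈ (['B','J','1'] : List Char)) ∨ (p.2 = 2 ∧ p.1 ∈ (['C','K','2'] : List Char)) ∨ (p.2 = 3 ∧ p.1 ∈ (['D','L','3'] : List Char)) ∨ (p.2 = 4 ∧ p.1 ∈ (['E','M','U','4'] : List Char)) ∨ (p.2 = 5 ∧ p.1 ∈ (['F','N','5'] : List Char)) ∨ (p.2 = 6 ∧ p.1 ∈ (['G','O','6'] : List Char)) ∨ (p.2 = 7 ∧ p.1 ∈ (['H','P','7'] : List Char)) := by decide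
            rcases hall _ hmem with h0 | ⟨hv, hm⟩ | ⟨hv, hm⟩ | ⟨hv, hm⟩ | ⟨hv, hm⟩ | ⟨hv, hm⟩ | ⟨hv, hm⟩ | ⟨hv, hm⟩
            · exact absurd h0 (by omega)
            · have hv' : pphDlq x = 1 := hv
              have hLk : 0 < pphClassCount l ['B','J','1'] :=
                (classCount_pos_iff l ['B','J','1'] pphND1).mpr ⟨x, hx, hm⟩
              rw [hv']
              split_ifs <;> omega
            · have hv' : pphDlq x = 2 := hv
              have hLk : 0 < pphClassCount l ['C','K','2'] :=
                (classCount_pos_iff l ['C','K','2'] pphND2).mpr ⟨x, hx, hm⟩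
              rw [hv']
              split_ifs <;> omega
            · have hv' : pphDlq x = 3 := hv
              have hLk : 0 < pphClassCount l ['D','L','3'] :=
                (classCount_pos_iff l ['D','L','3'] pphND3).mpr ⟨x, hx, hm⟩
              rw [hv']
              split_ifs <;> omega
            · have hv' : pphDlq x = 4 := hv
              have hLk : 0 < pphClassCount l ['E','M','U','4'] :=
                (classCount_pos_iff l ['E','M','U','4'] pphND4).mpr ⟨x, hx, hm⟩
              rw [hv']
              split_ifs <;> omega
            · have hv' : pphDlq x = 5 := hv
              have hLk : 0 < pphClassCount l ['F','N','5'] :=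
                (classCount_pos_iff l ['F','N','5'] pphND5).mpr ⟨x, hx, hm⟩
              rw [hv']
              split_ifs <;> omega
            · have hv' : pphDlq x = 6 := hv
              have hLk : 0 < pphClassCount l ['G','O','6'] :=
                (classCount_pos_iff l ['G','O','6'] pphND6).mpr ⟨x, hx, hm⟩
              rw [hv']
              split_ifs <;> omega
            · have hv' : pphDlq x = 7 := hv
              have hLk : 0 < pphClassCount l ['H','P','7'] :=
                (classCount_pos_iff l ['H','P','7'] pphND7).mpr ⟨x, hx, hm⟩
              rw [hv']
              split_ifs <;> omega
          · have hz : pphDlq x = 0 := le_antisymm (not_lt.mp hp) (pphDlq_nonneg x)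
            rw [hz]; split_ifs <;> norm_num
      · split_ifs with h7 h6 h5 h4 h3 h2 h1
        · exact class_le_M l ['H','P','7'] 7 pphND7 pphDlqAll7 h7
        · exact class_le_M l ['G','O','6'] 6 pphND6 pphDlqAll6 h6
        · exact class_le_M l ['F','N','5'] 5 pphND5 pphDlqAll5 h5
        · exact class_le_M l ['E','M','U','4'] 4 pphND4 pphDlqAll4 h4
        · exact class_le_M l ['D','L','3'] 3 pphND3 pphDlqAll3 h3
        · exact class_le_M l ['C','K','2'] 2 pphND2 pphDlqAll2 h2
        · exact class_le_M l ['B','J','1'] 1 pphND1 pphDlqAll1 h1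
        · exact fmax_init_le l 0
    · -- risk_flags
      rw [sum_counts pphRiskChars l (by decide)]
      exact_mod_cast congrArg Nat.cast (List.countP_congr (fun x _ => by rw [pphQ_eq x]))
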